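-- pv_equiv track=rewrite | github.com/lovit/python_ml4tm | day2_document_clustering/subword_tokenizer.py | count_subword
-- ===== SOURCE A (Python) =====
-- from collections import defaultdict
--
-- def find_subwords(word):
--     """
--     Argument
--     --------
--     word : str
--         Input token
--     Returns
--     -------
--     subwords : list of str
--         All possible left-side subwords
--     Usage
--     -----
--         >>> find_subword('abcde')
--         $ ['a', 'ab', 'abc', 'abcd', 'abcde']
--     """
--     return [word[:i] for i in range(1, len(word)+1)]
--
-- def count_subword(documents, min_count=50):
--     """
--     Arguments
--     ---------
--     documents : list of str
--         Document set
--     min_count : int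
--         Minumum frequency of subword
--         Default is 50
--     Returns
--     -------
--     subword counter : {str:int}
--     """
--     counter = defaultdict(int)
--     for doc in documents:
--         for word in doc.split():
--             for sub in find_subwords(word):
--                 counter[sub] += 1
--     counter = {sub:count for sub, count in counter.items() if count >= min_count}
--     return counter
-- ===== SOURCE B (Python) =====
-- from collections import Counter, defaultdict
--
-- def count_subword(documents, min_count=50):
--     # Aggregate first: count whole-word frequencies once, then expand each
--     # DISTINCT word into its prefixes, adding the word's whole count at once.
--     word_counts = Counter(w for doc in documents for w in doc.split())
--     counter = defaultdict(int)
--     for word, c in word_counts.items():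
--         prefix = ''
--         for ch in word:
--             prefix += ch
--             counter[prefix] += c
--     return {sub: count for sub, count in counter.items() if count >= min_count}
-- ===== Notes on version B (the rewrite author's own statement) =====
-- stated objective: faster
-- what changed: B first aggregates whole-word frequencies with one Counter pass, then expands each DISTINCT word once into its prefixes (built incrementally by appending one character) adding the word's full count in one step, instead of A's re-enumerating and re-counting every prefix slice of every word occurrence.
import Mathlib
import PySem

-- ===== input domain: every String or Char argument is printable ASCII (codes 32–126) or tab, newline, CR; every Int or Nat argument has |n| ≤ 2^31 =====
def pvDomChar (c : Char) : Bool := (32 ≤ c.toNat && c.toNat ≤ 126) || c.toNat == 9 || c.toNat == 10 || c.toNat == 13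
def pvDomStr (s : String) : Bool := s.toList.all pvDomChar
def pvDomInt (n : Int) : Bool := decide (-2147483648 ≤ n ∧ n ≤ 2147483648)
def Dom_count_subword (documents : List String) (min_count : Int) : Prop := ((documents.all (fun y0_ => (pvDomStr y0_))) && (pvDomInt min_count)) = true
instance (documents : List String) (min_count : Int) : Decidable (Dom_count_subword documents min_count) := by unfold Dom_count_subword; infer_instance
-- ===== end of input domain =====

-- B aggregates whole-word counts first and expands each distinct word's prefixes once
-- (incrementally, one character at a time); return value only, no argument is mutated.

-- ===== PORT A =====
def find_subwords (word : String) : List String :=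
  (PySem.List.pyRange 1 ((PySem.Str.len word : Int) + 1)).map
    (fun i => PySem.Str.slice word none (some i))

def count_subword (documents : List String) (min_count : Int) : List (String × Int) :=
  let counter : PySem.Dict String Int :=
    documents.foldl (fun d doc =>
      (PySem.Str.split₀ doc).foldl (fun d word =>
        (find_subwords word).foldl (fun d sub => d.modify sub 0 (· + 1)) d) d)
      PySem.Dict.empty
  (counter.items.foldl (fun (d : PySem.Dict String Int) p =>
      if min_count ≤ p.2 then d.insert p.1 p.2 else d) PySem.Dict.empty).items

-- ===== PORT B =====
def count_subword_alt (documents : List String) (min_count : Int) : List (String × Int) :=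
  let word_counts : PySem.Dict String Int :=
    PySem.Dict.counter (documents.flatMap (fun doc => PySem.Str.split₀ doc))
  let counter : PySem.Dict String Int :=
    word_counts.items.foldl (fun d wc =>
      (wc.1.toList.foldl
        (fun (st : String × PySem.Dict String Int) ch =>
          (String.ofList (st.1.toList ++ [ch]),
           st.2.modify (String.ofList (st.1.toList ++ [ch])) 0 (· + wc.2)))
        ("", d)).2)
      PySem.Dict.empty
  (counter.items.foldl (fun (d : PySem.Dict String Int) p =>
      if min_count ≤ p.2 then d.insert p.1 p.2 else d) PySem.Dict.empty).items

-- ===== PRECONDITION & SPEC =====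
def Spec_count_subword (documents : List String) (min_count : Int) (out : List (String × Int)) : Prop := out = count_subword_alt documents min_count
instance (documents : List String) (min_count : Int) (out : List (String × Int)) : Decidable (Spec_count_subword documents min_count out) := by unfold Spec_count_subword; infer_instance

-- ===== CLAIM (what is proved, stated in full; the proofs are below) =====
def Claim_equal_count_subword : Prop := ∀ (documents : List String) (min_count : Int), Dom_count_subword documents min_count → Spec_count_subword documents min_count (count_subword documents min_count)

-- ===== LEMMAS AND PROOFS =====

/-- The prefix strings B's inner loop visits, starting from accumulated prefix `p`. -/
def prefs (p : List Char) : List Char → List String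
  | [] => []
  | c :: cs => String.ofList (p ++ [c]) :: prefs (p ++ [c]) cs

/-- B's character loop over a word equals a fold over the word's prefix list. -/
theorem charloop_eq (c : Int) (cs : List Char) (ps : String) (d : PySem.Dict String Int) :
    cs.foldl
      (fun (st : String × PySem.Dict String Int) ch =>
        (String.ofList (st.1.toList ++ [ch]),
         st.2.modify (String.ofList (st.1.toList ++ [ch])) 0 (· + c)))
      (ps, d)
    = (String.ofList (ps.toList ++ cs),
       (prefs ps.toList cs).foldl (fun d q => d.modify q 0 (· + c)) d) := by
  induction cs generalizing ps d with
  | nil => simp [prefs]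
  | cons ch cs ih =>
    simp only [List.foldl_cons, prefs]
    rw [ih]
    simp

theorem prefs_eq (cs : List Char) (p : List Char) :
    prefs p cs = (List.range cs.length).map (fun i => String.ofList (p ++ cs.take (i+1))) := by
  induction cs generalizing p with
  | nil => simp [prefs]
  | cons ch cs ih =>
    rw [prefs, ih]
    simp only [List.length_cons, List.range_succ_eq_map, List.map_cons, List.map_map]
    congr 1
    apply List.map_congr_left
    intro i _
    simp [List.take_succ_cons, List.append_assoc]

theorem pyRange_shift (n : Nat) (a : Int) :
    PySem.List.pyRange a (a + n) = (List.range n).map (fun i : Nat => a + (i : Int)) := by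
  induction n generalizing a with
  | zero => simp [PySem.List.pyRange]
  | succ n ih =>
    rw [PySem.List.pyRange_one_cons (by omega), List.range_succ_eq_map]
    rw [show (a + ((n+1 : Nat) : Int)) = (a + 1) + (n : Int) by push_cast; ring, ih]
    simp only [List.map_cons, List.map_map]
    congr 1
    · push_cast; ring
    · apply List.map_congr_left; intro i _; simp [Function.comp]; ring

theorem find_subwords_eq (w : String) :
    find_subwords w = prefs [] w.toList := by
  rw [prefs_eq]
  unfold find_subwords
  have hlen : ((PySem.Str.len w : Int) + 1) = 1 + (w.toList.length : Int) := by
    simp [pysem]; ring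
  rw [hlen, show (1 : Int) + (w.toList.length : Int) = 1 + ((w.toList.length : Nat) : Int) from rfl]
  rw [pyRange_shift, List.map_map]
  apply List.map_congr_left
  intro i hi
  simp only [Function.comp]
  have h1 : (0:Int) ≤ 1 + (i : Int) := by omega
  have : (PySem.Str.slice w none (some (1 + (i:Int)))).toList = w.toList.take (i+1) := by
    simp [pysem, PySem.List.slice_to _ h1]
    congr 1
    omega
  calc PySem.Str.slice w none (some (1 + (i:Int)))
      = String.ofList (PySem.Str.slice w none (some (1 + (i:Int)))).toList :=
        String.ofList_toList.symm
    _ = String.ofList ([] ++ w.toList.take (i+1)) := by rw [this]; simp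

theorem getD_foldl_modify_add_const (c : Int) (ps : List String) (d : PySem.Dict String Int) (v : String) :
    (ps.foldl (fun d q => d.modify q 0 (· + c)) d).getD v 0 = d.getD v 0 + c * ps.count v := by
  induction ps generalizing d with
  | nil => simp
  | cons q ps ih =>
    simp only [List.foldl_cons, ih, PySem.Dict.getD_modify, List.count_cons]
    by_cases h : v = q
    · subst h; simp; ring
    · simp only [beq_iff_eq]
      simp [h]
      exact Or.inl (fun hh => h hh.symm)

/-- Outer fold over (word, count) pairs: value at `v`. -/
theorem getD_outer (l : List (String × Int)) (d : PySem.Dict String Int) (v : String) :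
    (l.foldl (fun d wc => (find_subwords wc.1).foldl (fun d q => d.modify q 0 (· + wc.2)) d) d).getD v 0
      = d.getD v 0 + (l.map (fun wc => wc.2 * ((find_subwords wc.1).count v : Int))).sum := by
  induction l generalizing d with
  | nil => simp
  | cons wc l ih =>
    simp only [List.foldl_cons, ih, List.map_cons, List.sum_cons,
      getD_foldl_modify_add_const]
    ring

/-- Outer fold over (word, count) pairs: keys. -/
theorem keys_outer (l : List (String × Int)) (d : PySem.Dict String Int) :
    (l.foldl (fun d wc => (find_subwords wc.1).foldl (fun d q => d.modify q 0 (· + wc.2)) d) d).keys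
      = PySem.Set.update d.keys (l.flatMap (fun wc => find_subwords wc.1)) := by
  induction l generalizing d with
  | nil => simp [PySem.Set.update_nil]
  | cons wc l ih =>
    simp only [List.foldl_cons, ih, List.flatMap_cons]
    rw [PySem.Dict.keys_foldl_modify (f := fun _ _ => (· + wc.2)), PySem.Set.update_append]

theorem sum_ite_single (S : List String) (x : String) (t : Int) (hnd : S.Nodup) (hx : x ∈ S) :
    (S.map (fun k => if k = x then t else 0)).sum = t := by
  induction S with
  | nil => cases hx
  | cons a S ih =>
    rcases List.mem_cons.mp hx with h | h
    · subst h
      have hz : (S.map (fun k => if k = x then t else 0)).sum = 0 := by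
        apply List.sum_eq_zero
        intro y hy
        rcases List.mem_map.mp hy with ⟨k, hk, rfl⟩
        have : k ≠ x := by rintro rfl; exact (List.nodup_cons.mp hnd).1 hk
        simp [this]
      simp [hz]
    · have hns : a ≠ x := by rintro rfl; exact (List.nodup_cons.mp hnd).1 h
      simp [hns, ih (List.nodup_cons.mp hnd).2 h]

theorem grouped_sum (S : List String) (W : List String) (g : String → Nat)
    (hnd : S.Nodup) (hsub : ∀ w ∈ W, w ∈ S) :
    (S.map (fun k => ((W.count k : Int)) * (g k : Int))).sum = ((W.map g).sum : Int) := by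
  induction W with
  | nil => simp
  | cons x W ih =>
    have hx : x ∈ S := hsub x (List.mem_cons_self)
    have step : ∀ k : String, (((x :: W).count k : Int)) * (g k : Int)
        = ((W.count k : Int)) * (g k : Int) + (if k = x then (g k : Int) else 0) := by
      intro k
      by_cases h : k = x
      · subst h; simp [List.count_cons_self]; ring
      · simp [h]
        exact Or.inl (by rw [List.count_cons]; simp [Ne.symm h])
    calc (S.map (fun k => (((x :: W).count k : Int)) * (g k : Int))).sum
        = (S.map (fun k => ((W.count k : Int)) * (g k : Int) + (if k = x then (g k : Int) else 0))).sum := by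
          simp only [step]
      _ = (S.map (fun k => ((W.count k : Int)) * (g k : Int))).sum
            + (S.map (fun k => if k = x then (g x : Int) else 0)).sum := by
          rw [← List.sum_map_add]
          congr 1
          apply List.map_congr_left
          intro k _
          by_cases h : k = x <;> simp [h]
      _ = ((W.map g).sum : Int) + (g x : Int) := by
          rw [ih (fun w hw => hsub w (List.mem_cons_of_mem _ hw)),
              sum_ite_single S x _ hnd hx]
      _ = (((x :: W).map g).sum : Int) := by
          simp [List.map_cons, List.sum_cons, add_comm]

theorem update_of_subset (s : PySem.Set String) (xs : List String)
    (h : ∀ y ∈ xs, y ∈ s) : PySem.Set.update s xs = s := by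
  rw [PySem.Set.update_eq_append_filter]
  have : (PySem.Set.ofList xs).filter (fun y => !PySem.Set.contains s y) = [] := by
    apply List.filter_eq_nil_iff.mpr
    intro y hy
    have : y ∈ s := h y ((PySem.Set.mem_ofList xs y).mp hy)
    simp [pysem, this]
  rw [this, List.append_nil]

theorem set_flatMap_ofList (W : List String) (f : String → List String) :
    PySem.Set.ofList ((PySem.Set.ofList W : List String).flatMap f) = PySem.Set.ofList (W.flatMap f) := by
  induction W using List.reverseRecOn with
  | nil => rfl
  | append_singleton W x ih =>
    rw [PySem.Set.ofList_append_singleton]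
    by_cases hx : x ∈ W
    · rw [PySem.Set.add_of_mem ((PySem.Set.mem_ofList W x).mpr hx), ih, List.flatMap_append,
        PySem.Set.ofList_append]
      symm
      apply update_of_subset
      intro y hy
      simp only [List.flatMap_singleton] at hy
      exact (PySem.Set.mem_ofList _ y).mpr (List.mem_flatMap.mpr ⟨x, hx, hy⟩)
    · rw [PySem.Set.add_of_not_mem (fun hc => hx ((PySem.Set.mem_ofList W x).mp hc)),
        List.flatMap_append, PySem.Set.ofList_append, ih,
        List.flatMap_append, PySem.Set.ofList_append]

theorem counters_eq (documents : List String) :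
    (PySem.Dict.counter (documents.flatMap (fun doc => PySem.Str.split₀ doc))).items.foldl
        (fun d wc =>
          ((wc.1.toList.foldl
            (fun (st : String × PySem.Dict String Int) ch =>
              (String.ofList (st.1.toList ++ [ch]),
               st.2.modify (String.ofList (st.1.toList ++ [ch])) 0 (· + wc.2)))
            ("", d)).2))
        PySem.Dict.empty
    = documents.foldl (fun d doc =>
        (PySem.Str.split₀ doc).foldl (fun d word =>
          (find_subwords word).foldl (fun d sub => d.modify sub 0 (· + 1)) d) d)
        PySem.Dict.empty := by
  have hfun : (fun (d : PySem.Dict String Int) (wc : String × Int) =>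
      ((wc.1.toList.foldl
        (fun (st : String × PySem.Dict String Int) ch =>
          (String.ofList (st.1.toList ++ [ch]),
           st.2.modify (String.ofList (st.1.toList ++ [ch])) 0 (· + wc.2)))
        ("", d)).2))
      = (fun (d : PySem.Dict String Int) (wc : String × Int) =>
          (find_subwords wc.1).foldl (fun d q => d.modify q 0 (· + wc.2)) d) := by
    funext d wc
    rw [charloop_eq wc.2 wc.1.toList "" d]
    simp [find_subwords_eq]
  rw [hfun]
  -- names for the word stream and the prefix stream
  set W := documents.flatMap (fun doc => PySem.Str.split₀ doc) with hW
  set P := W.flatMap find_subwords with hP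
  set l := (PySem.Dict.counter W).items with hl
  have hkeys : (l.foldl (fun d wc => (find_subwords wc.1).foldl (fun d q => d.modify q 0 (· + wc.2)) d) PySem.Dict.empty).keys
      = PySem.Set.ofList P := by
    rw [keys_outer]
    have : l.flatMap (fun wc => find_subwords wc.1)
        = (PySem.Set.ofList W : List String).flatMap find_subwords := by
      rw [hl, PySem.Dict.items_counter]
      rw [List.flatMap_map]
    rw [this]
    have h0 : (PySem.Dict.empty : PySem.Dict String Int).keys = ([] : List String) := by simp
    rw [h0, PySem.Set.update_nil_left, set_flatMap_ofList, hP]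
  have hget : ∀ v, (l.foldl (fun d wc => (find_subwords wc.1).foldl (fun d q => d.modify q 0 (· + wc.2)) d) PySem.Dict.empty).getD v 0
      = ((P.count v : Nat) : Int) := by
    intro v
    rw [getD_outer]
    rw [hl, PySem.Dict.items_counter, List.map_map]
    have : ((PySem.Set.ofList W : List String).map
        ((fun wc : String × Int => wc.2 * ((find_subwords wc.1).count v : Int)) ∘ (fun k => (k, (W.count k : Int))))).sum
        = ((W.map (fun w => (find_subwords w).count v)).sum : Int) :=
      grouped_sum (PySem.Set.ofList W) W (fun w => (find_subwords w).count v)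
        (PySem.Set.nodup_ofList W) (fun w hw => (PySem.Set.mem_ofList W w).mpr hw)
    rw [this]
    rw [hP, List.count_flatMap]
    rw [PySem.Dict.getD_empty, zero_add]
    rfl
  have hB : (l.foldl (fun d wc => (find_subwords wc.1).foldl (fun d q => d.modify q 0 (· + wc.2)) d) PySem.Dict.empty)
      = PySem.Dict.counter P := by
    apply PySem.Dict.ext
    rw [PySem.Dict.items_eq_map_keys _ (hkeys ▸ PySem.Set.nodup_ofList P) 0,
      PySem.Dict.items_counter, hkeys]
    apply List.map_congr_left
    intro k _
    rw [hget k]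
  rw [hB, PySem.Dict.counter_eq_foldl, hP, hW, List.foldl_flatMap, List.foldl_flatMap]

-- ===== VERDICT (by name: the statement is the Claim_ definition above) =====
theorem count_subword_spec : Claim_equal_count_subword := by
  intro documents min_count _
  unfold Spec_count_subword count_subword count_subword_alt
  simp only [counters_eq]
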